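-- pv_equiv track=rewrite | github.com/narvikd/google-foobar | 3. Gearing Up For Destruction/sol.py | solution
-- ===== SOURCE A (Python) =====
-- def solution(pegs):
--     for i in range(1, pegs[1]):
--         r = i
--         for j, p in enumerate(pegs):
--             try:
--                 new_index = pegs[j + 1]
--             except IndexError:
--                 break
--             r = new_index - (p + r)
--             if r <= 0:
--                 break
--         if r * 2 == i:
--             return [i, 1]
--         if r * 2 == i + 1:
--             return [i * 3 + 1, 3]
--         if r * 2 == i + 2:
--             return [i * 3 + 2, 3]
--     return [-1, -1]
-- ===== SOURCE B (Python) =====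
-- def solution(pegs):
--     p1 = pegs[1]
--     # Last radius is a linear function of the first radius x: r_last = S + s*x, s = +/-1.
--     S, s = 0, 1
--     for a, b in zip(pegs, pegs[1:]):
--         S, s = (b - a) - S, -s
--
--     def valid(i):
--         if not (1 <= i < p1):
--             return False
--         r = i
--         for a, b in zip(pegs, pegs[1:]):
--             r = (b - a) - r
--             if r <= 0:
--                 return False
--         return True
--
--     # Solve 2*r_last(i) == i + c for integer i and c in {0,1,2}.
--     if s == 1:
--         for c in (0, 1, 2):
--             i = c - 2 * S
--             if valid(i):
--                 return [i, 1] if c == 0 else [i * 3 + c, 3]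
--     else:
--         c = (2 * S) % 3
--         i = (2 * S - c) // 3
--         if valid(i):
--             return [i, 1] if c == 0 else [i * 3 + c, 3]
--     return [-1, -1]
-- ===== Notes on version B (the rewrite author's own statement) =====
-- stated objective: faster
-- what changed: Instead of scanning every candidate first radius i in range(1, pegs[1]) and simulating the gear chain for each, B notes the last radius is a linear function S + s*i of the first and solves 2*(S + s*i) = i + c (c in {0,1,2}) in closed form, validating only the at most three resulting candidates with one O(n) pass each.
import Mathlib
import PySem

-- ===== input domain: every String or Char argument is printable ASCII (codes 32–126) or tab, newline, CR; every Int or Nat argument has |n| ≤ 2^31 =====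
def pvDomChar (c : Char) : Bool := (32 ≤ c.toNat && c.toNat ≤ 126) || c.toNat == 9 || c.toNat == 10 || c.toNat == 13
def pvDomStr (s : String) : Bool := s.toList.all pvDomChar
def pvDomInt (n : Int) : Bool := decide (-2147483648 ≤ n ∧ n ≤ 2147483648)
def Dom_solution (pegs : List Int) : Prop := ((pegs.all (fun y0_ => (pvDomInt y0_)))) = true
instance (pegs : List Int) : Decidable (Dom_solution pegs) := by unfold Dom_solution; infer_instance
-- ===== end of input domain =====

-- B replaces A's scan over all candidate radii 1..pegs[1]-1 by a closed-form solve of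
-- 2*(S + s*i) = i + c; equivalence of return values is proved below (no side effects involved).

-- ===== PORT A =====
-- inner loop: for j,p in enumerate(pegs): new_index = pegs[j+1] (break on IndexError);
-- r = new_index - (p + r); break if r <= 0
def aInner : List Int → Int → Int
  | p :: q :: rest, r =>
      let r' := q - (p + r)
      if r' ≤ 0 then r' else aInner (q :: rest) r'
  | _, r => r

-- outer loop body over the remaining candidates i
def aScan (pegs : List Int) : List Int → List Int
  | [] => [-1, -1]
  | i :: is =>
      let r := aInner pegs i
      if r * 2 = i then [i, 1]
      else if r * 2 = i + 1 then [i * 3 + 1, 3]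
      else if r * 2 = i + 2 then [i * 3 + 2, 3]
      else aScan pegs is

def solution (pegs : List Int) : List Int :=
  match PySem.List.pyGet? pegs 1 with
  | some p1 => aScan pegs (PySem.List.pyRange 1 p1 1)
  | none => [-1, -1]   -- pegs[1] raises IndexError: outside Pre_

-- ===== PORT B =====
-- S, s = (b - a) - S, -s over consecutive pairs
def bCoeffs : List Int → Int → Int → Int × Int
  | a :: b :: rest, S, s => bCoeffs (b :: rest) ((b - a) - S) (-s)
  | _, S, s => (S, s)

-- the simulation part of valid(i): every radius stays positive
def bAllPos : List Int → Int → Bool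
  | a :: b :: rest, r =>
      let r' := (b - a) - r
      if r' ≤ 0 then false else bAllPos (b :: rest) r'
  | _, _ => true

def bValid (pegs : List Int) (p1 i : Int) : Bool :=
  (decide (1 ≤ i) && decide (i < p1)) && bAllPos pegs i

def bOut (i c : Int) : List Int :=
  if c = 0 then [i, 1] else [i * 3 + c, 3]

-- for c in (0,1,2): i = c - 2*S; if valid(i): return …
def bTryC (pegs : List Int) (p1 S : Int) : List Int → List Int
  | [] => [-1, -1]
  | c :: cs =>
      let i := c - 2 * S
      if bValid pegs p1 i then bOut i c else bTryC pegs p1 S cs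

def solution_alt (pegs : List Int) : List Int :=
  match PySem.List.pyGet? pegs 1 with
  | some p1 =>
      let Ss := bCoeffs pegs 0 1
      if Ss.2 = 1 then
        bTryC pegs p1 Ss.1 [0, 1, 2]
      else
        let c := PySem.Int.mod (2 * Ss.1) 3
        let i := PySem.Int.floordiv (2 * Ss.1 - c) 3
        if bValid pegs p1 i then bOut i c else [-1, -1]
  | none => [-1, -1]   -- pegs[1] raises IndexError: outside Pre_

-- ===== PRECONDITION & SPEC =====
-- A evaluates pegs[1], which raises IndexError on lists of length < 2.
def Pre_solution (pegs : List Int) : Prop := 2 ≤ pegs.length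
instance (pegs : List Int) : Decidable (Pre_solution pegs) := by unfold Pre_solution; infer_instance
def pvWitness_solution : List Int := [4, 30, 50]

def Spec_solution (pegs : List Int) (out : List Int) : Prop := out = solution_alt pegs
instance (pegs : List Int) (out : List Int) : Decidable (Spec_solution pegs out) := by unfold Spec_solution; infer_instance

-- ===== CLAIM (what is proved, stated in full; the proofs are below) =====
def Claim_equal_solution : Prop := ∀ (pegs : List Int), Dom_solution pegs → Pre_solution pegs → Spec_solution pegs (solution pegs)

-- ===== LEMMAS AND PROOFS =====

-- the three checks of A's outer loop body, as an Option
def mOut (pegs : List Int) (i : Int) : Option (List Int) :=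
  let r := aInner pegs i
  if r * 2 = i then some [i, 1]
  else if r * 2 = i + 1 then some [i * 3 + 1, 3]
  else if r * 2 = i + 2 then some [i * 3 + 2, 3]
  else none

lemma aScan_eq_findSome? (pegs : List Int) : ∀ l : List Int,
    aScan pegs l = (l.findSome? (mOut pegs)).getD [-1, -1] := by
  intro l
  induction l with
  | nil => simp [aScan]
  | cons i is ih =>
      simp only [aScan, mOut, List.findSome?_cons]
      split_ifs <;> simp [ih]

lemma aInner_lin : ∀ (pegs : List Int) (r S s x : Int), r = S + s * x →
    bAllPos pegs r = true →
    aInner pegs r = (bCoeffs pegs S s).1 + (bCoeffs pegs S s).2 * x := by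
  intro pegs
  induction pegs with
  | nil => intro r S s x hr _; subst hr; rfl
  | cons p tail ih =>
      intro r S s x hr hpos
      cases tail with
      | nil => subst hr; rfl
      | cons q rest =>
          simp only [aInner, bCoeffs, bAllPos] at *
          have hval : q - (p + r) = (q - p) - r := by ring
          have hcond : ¬ ((q - p) - r ≤ 0) := by
            intro h
            rw [if_pos h] at hpos
            exact Bool.false_ne_true hpos
          rw [if_neg hcond] at hpos
          rw [hval, if_neg hcond]
          exact ih ((q - p) - r) ((q - p) - S) (-s) x (by rw [hr]; ring) hpos

lemma aInner_nonpos : ∀ (pegs : List Int) (r : Int),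
    bAllPos pegs r = false → aInner pegs r ≤ 0 := by
  intro pegs
  induction pegs with
  | nil => intro r h; simp [bAllPos] at h
  | cons p tail ih =>
      intro r h
      cases tail with
      | nil => simp [bAllPos] at h
      | cons q rest =>
          simp only [aInner, bAllPos] at *
          have hval : q - (p + r) = (q - p) - r := by ring
          by_cases hc : (q - p) - r ≤ 0
          · rw [hval, if_pos hc]; exact hc
          · rw [hval, if_neg hc]
            rw [if_neg hc] at h
            exact ih _ h

lemma bCoeffs_snd : ∀ (pegs : List Int) (S s : Int),
    (bCoeffs pegs S s).2 = s ∨ (bCoeffs pegs S s).2 = -s := by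
  intro pegs
  induction pegs with
  | nil => intro S s; simp [bCoeffs]
  | cons p tail ih =>
      intro S s
      cases tail with
      | nil => simp [bCoeffs]
      | cons q rest =>
          simp only [bCoeffs]
          rcases ih ((q - p) - S) (-s) with h | h
          · right; rw [h]
          · left; rw [h]; ring

-- value of aInner at i, given the final linear coefficients
lemma aInner_val (pegs : List Int) (i S s : Int) (hc : bCoeffs pegs 0 1 = (S, s))
    (hpos : bAllPos pegs i = true) : aInner pegs i = S + s * i := by
  have h := aInner_lin pegs i 0 1 i (by ring) hpos
  rw [hc] at h
  simpa using h

-- findSome? with a pointwise-on-members equal function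
lemma findSome?_congr_mem {α β : Type} (f g : α → Option β) :
    ∀ l : List α, (∀ x ∈ l, f x = g x) → l.findSome? f = l.findSome? g := by
  intro l
  induction l with
  | nil => simp
  | cons x t ih =>
      intro h
      simp only [List.findSome?_cons]
      rw [h x (List.mem_cons_self)]
      cases g x with
      | some v => simp
      | none => simpa using ih (fun y hy => h y (List.mem_cons_of_mem _ hy))

lemma findSome?_const_none {α β : Type} : ∀ l : List α,
    l.findSome? (fun _ => (none : Option β)) = none := by
  intro l; induction l with
  | nil => simp
  | cons x t ih => simp [ih]

-- in a sorted list, the first candidate with a value wins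
lemma findSome?_sorted_first {β : Type} (g : Int → Option β) :
    ∀ (cs : List Int) (x : Int) (v : β), cs.Pairwise (· < ·) → x ∈ cs → g x = some v →
    (∀ c ∈ cs, c < x → g c = none) → cs.findSome? g = some v := by
  intro cs
  induction cs with
  | nil => intro x v _ hx; simp at hx
  | cons c0 t ih =>
      intro x v hp hx hgx hnone
      rcases List.mem_cons.mp hx with rfl | hxt
      · simp [hgx]
      · have hlt : c0 < x := (List.pairwise_cons.mp hp).1 x hxt
        have h0 : g c0 = none := hnone c0 List.mem_cons_self hlt
        simp only [List.findSome?_cons, h0]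
        exact ih x v (List.pairwise_cons.mp hp).2 hxt hgx
          (fun c hc hcx => hnone c (List.mem_cons_of_mem _ hc) hcx)

-- main chain lemma: scanning a sorted list where f can only fire on candidates cs
lemma findChain (f : Int → Option (List Int)) (cs : List Int) (hcs : cs.Pairwise (· < ·)) :
    ∀ l : List Int, l.Pairwise (· < ·) →
    (∀ i ∈ l, f i ≠ none → i ∈ cs) →
    l.findSome? f = cs.findSome? (fun c => if c ∈ l then f c else none) := by
  intro l
  induction l with
  | nil =>
      intro _ _
      simp only [List.findSome?_nil, List.not_mem_nil, if_false]
      exact (findSome?_const_none cs).symm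
  | cons x t ih =>
      intro hp hf
      have hxt : ∀ y ∈ t, x < y := (List.pairwise_cons.mp hp).1
      have hpt : t.Pairwise (· < ·) := (List.pairwise_cons.mp hp).2
      cases hfx : f x with
      | some v =>
          have hxcs : x ∈ cs := hf x List.mem_cons_self (by simp [hfx])
          simp only [List.findSome?_cons, hfx]
          refine (findSome?_sorted_first _ cs x v hcs hxcs ?_ ?_).symm
          · simp [hfx]
          · intro c _ hcx
            have hcl : c ∉ x :: t := by
              intro hmem
              rcases List.mem_cons.mp hmem with rfl | hct
              · exact lt_irrefl c hcx
              · exact absurd (hxt c hct) (by omega)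
            simp [hcl]
      | none =>
          simp only [List.findSome?_cons, hfx]
          rw [ih hpt (fun i hi hne => hf i (List.mem_cons_of_mem _ hi) hne)]
          apply findSome?_congr_mem
          intro c _
          by_cases hcx : c = x
          · subst hcx
            have hct : c ∉ t := fun hct => absurd (hxt c hct) (lt_irrefl c)
            simp [hct, hfx]
          · by_cases hct : c ∈ t <;> simp [hct, hcx]

-- a candidate fires iff all radii stay positive (given 1 ≤ i), case s = +1
lemma mOut_eval (pegs : List Int) (S s i c : Int) (hc : bCoeffs pegs 0 1 = (S, s))
    (hi : 1 ≤ i) (hcr : 0 ≤ c ∧ c < 3) (heq : 2 * (S + s * i) = i + c) :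
    mOut pegs i = if bAllPos pegs i = true then some (bOut i c) else none := by
  cases hpos : bAllPos pegs i with
  | false =>
      have hle := aInner_nonpos pegs i hpos
      simp only [mOut, if_neg (by omega : ¬ aInner pegs i * 2 = i),
        if_neg (by omega : ¬ aInner pegs i * 2 = i + 1),
        if_neg (by omega : ¬ aInner pegs i * 2 = i + 2)]
      simp
  | true =>
      have hv := aInner_val pegs i S s hc hpos
      simp only [mOut, hv, bOut]
      have h2 : (S + s * i) * 2 = i + c := by omega
      rcases (by omega : c = 0 ∨ c = 1 ∨ c = 2) with rfl | rfl | rfl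
      · simp only [if_pos (by omega : (S + s * i) * 2 = i)]
        simp
      · rw [if_neg (by omega), if_pos (by omega : (S + s * i) * 2 = i + 1)]
        simp
      · rw [if_neg (by omega), if_neg (by omega), if_pos (by omega : (S + s * i) * 2 = i + 2)]
        simp

-- a firing candidate must solve the linear equation
lemma mOut_fire (pegs : List Int) (S s i : Int) (hc : bCoeffs pegs 0 1 = (S, s))
    (hi : 1 ≤ i) (hne : mOut pegs i ≠ none) :
    bAllPos pegs i = true ∧ ∃ c, 0 ≤ c ∧ c < 3 ∧ 2 * (S + s * i) = i + c := by
  cases hpos : bAllPos pegs i with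
  | false =>
      exfalso
      have hle := aInner_nonpos pegs i hpos
      apply hne
      simp only [mOut]
      rw [if_neg (by omega), if_neg (by omega), if_neg (by omega)]
  | true =>
      have hv := aInner_val pegs i S s hc hpos
      refine ⟨rfl, ?_⟩
      simp only [mOut, hv] at hne
      by_cases h0 : (S + s * i) * 2 = i
      · exact ⟨0, by omega, by omega, by omega⟩
      by_cases h1 : (S + s * i) * 2 = i + 1
      · exact ⟨1, by omega, by omega, by omega⟩
      by_cases h2 : (S + s * i) * 2 = i + 2
      · exact ⟨2, by omega, by omega, by omega⟩
      rw [if_neg h0, if_neg h1, if_neg h2] at hne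
      exact absurd rfl hne

-- the chain term at a candidate equals B's valid-guarded output
lemma chain_term (pegs : List Int) (S s p1 i c : Int) (hc : bCoeffs pegs 0 1 = (S, s))
    (hcr : 0 ≤ c ∧ c < 3) (heq : 2 * (S + s * i) = i + c) :
    (if i ∈ PySem.List.pyRange 1 p1 1 then mOut pegs i else none)
      = if bValid pegs p1 i = true then some (bOut i c) else none := by
  by_cases hmem : i ∈ PySem.List.pyRange 1 p1 1
  · have hb := (PySem.List.mem_pyRange_one (a := 1) (b := p1) (x := i)).mp hmem
    rw [if_pos hmem, mOut_eval pegs S s i c hc hb.1 hcr heq]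
    have hv : bValid pegs p1 i = bAllPos pegs i := by
      simp [bValid, hb.1, hb.2]
    simp only [hv]
  · have hb := fun h1 h2 => hmem ((PySem.List.mem_pyRange_one).mpr ⟨h1, h2⟩)
    rw [if_neg hmem]
    simp only [bValid]
    by_cases h1 : (1 : Int) ≤ i
    · have h2 : ¬ i < p1 := fun h => hb h1 h
      simp [h1, h2]
    · simp [h1]

theorem solution_spec : Claim_equal_solution := by
  unfold Claim_equal_solution Spec_solution Pre_solution
  intro pegs _ hlen
  have hget : PySem.List.pyGet? pegs 1 = some (pegs.getD 1 0) := by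
    match pegs, hlen with
    | p :: q :: rest, _ => simp [PySem.List.pyGet?, PySem.List.pyIdx?]
  set p1 := pegs.getD 1 0 with hp1
  obtain ⟨S, s, hc⟩ : ∃ S s, bCoeffs pegs 0 1 = (S, s) := ⟨_, _, rfl⟩
  have hs : s = 1 ∨ s = -1 := by
    have := bCoeffs_snd pegs 0 1
    rw [hc] at this
    simpa using this
  have hrangeP : (PySem.List.pyRange 1 p1 1).Pairwise (· < ·) :=
    PySem.List.pairwise_lt_pyRange_one 1 p1
  simp only [solution, solution_alt, hget, hc]
  rw [aScan_eq_findSome?]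
  rcases hs with rfl | rfl
  · -- s = 1 : candidates i = c - 2S for c = 0,1,2, ascending
    rw [if_pos rfl]
    have hfire : ∀ i ∈ PySem.List.pyRange 1 p1 1, mOut pegs i ≠ none →
        i ∈ [0 - 2 * S, 1 - 2 * S, 2 - 2 * S] := by
      intro i hi hne
      have h1 := (PySem.List.mem_pyRange_one.mp hi).1
      obtain ⟨_, c, hc0, hc3, heq⟩ := mOut_fire pegs S 1 i hc h1 hne
      simp only [List.mem_cons, List.not_mem_nil, or_false]
      omega
    rw [findChain (mOut pegs) [0 - 2 * S, 1 - 2 * S, 2 - 2 * S]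
      (by simp) _ hrangeP hfire]
    simp only [List.findSome?_cons, List.findSome?_nil]
    rw [chain_term pegs S 1 p1 (0 - 2 * S) 0 hc (by omega) (by ring),
        chain_term pegs S 1 p1 (1 - 2 * S) 1 hc (by omega) (by ring),
        chain_term pegs S 1 p1 (2 - 2 * S) 2 hc (by omega) (by ring)]
    simp only [bTryC]
    split_ifs <;> simp
  · -- s = -1 : unique candidate i0 = (2S - c0) / 3 with c0 = (2S) mod 3
    rw [if_neg (by decide)]
    have hm : PySem.Int.mod (2 * S) 3 = (2 * S) % 3 :=
      PySem.Int.mod_eq_emod_of_pos (by omega)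
    obtain ⟨c0, hc0def⟩ : ∃ x, PySem.Int.mod (2 * S) 3 = x := ⟨_, rfl⟩
    have hc0e : c0 = (2 * S) % 3 := by rw [← hc0def, hm]
    have hc0r : 0 ≤ c0 ∧ c0 < 3 := by rw [hc0e]; omega
    have hfd : PySem.Int.floordiv (2 * S - c0) 3 = (2 * S - c0) / 3 :=
      PySem.Int.floordiv_eq_ediv_of_pos (by omega)
    obtain ⟨i0, hi0def⟩ : ∃ x, PySem.Int.floordiv (2 * S - c0) 3 = x := ⟨_, rfl⟩
    have hi0 : 3 * i0 = 2 * S - c0 := by rw [← hi0def, hfd]; omega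
    have heq0 : 2 * (S + (-1) * i0) = i0 + c0 := by omega
    have hfire : ∀ i ∈ PySem.List.pyRange 1 p1 1, mOut pegs i ≠ none → i ∈ [i0] := by
      intro i hi hne
      have h1 := (PySem.List.mem_pyRange_one.mp hi).1
      obtain ⟨_, c, hcr0, hcr3, heq⟩ := mOut_fire pegs S (-1) i hc h1 hne
      simp only [List.mem_cons, List.not_mem_nil, or_false]
      omega
    rw [hc0def, hi0def]
    rw [findChain (mOut pegs) [i0] (by simp) _ hrangeP hfire]
    simp only [List.findSome?_cons, List.findSome?_nil]
    rw [chain_term pegs S (-1) p1 i0 c0 hc hc0r heq0]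
    split_ifs <;> simp
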